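-- pv_equiv track=rewrite | github.com/mmdev2003/real-estate-ai-tg-bot | wewall-estate-calculator/pkg/estate_calculator/estate_calculator.py | EPA_validation
-- ===== SOURCE A (Python) =====
-- def EPA_validation(EPA, project_readiness, transaction_dict):
--     Q_list = [EPA, project_readiness] + list(transaction_dict.keys())
--     Q_split_list = []
--     for quartal in Q_list:
--         Q_split_list.append((quartal.split("Q")[0], quartal.split("Q")[1]))
--
--     min_year = min([j[1] for j in Q_split_list])
--     Q_split_list = [i for i in Q_split_list if i[1] == min_year]
--     min_quartal = min([j[0] for j in Q_split_list])
--
--     return str(min_quartal) + "Q" + min_year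
-- ===== SOURCE B (Python) =====
-- def EPA_validation(EPA, project_readiness, transaction_dict):
--     parts = EPA.split("Q")
--     best_q, best_y = parts[0], parts[1]
--     for s in [project_readiness, *transaction_dict]:
--         parts = s.split("Q")
--         q, y = parts[0], parts[1]
--         if (y, q) < (best_y, best_q):
--             best_q, best_y = q, y
--     return best_q + "Q" + best_y
-- ===== Notes on version B (the rewrite author's own statement) =====
-- stated objective: simpler
-- what changed: Replaces A's three passes (min over years, filter by min year, min over quartals) with a single loop that keeps the lexicographically least (year, quartal) pair, seeded from EPA.
import Mathlib
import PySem

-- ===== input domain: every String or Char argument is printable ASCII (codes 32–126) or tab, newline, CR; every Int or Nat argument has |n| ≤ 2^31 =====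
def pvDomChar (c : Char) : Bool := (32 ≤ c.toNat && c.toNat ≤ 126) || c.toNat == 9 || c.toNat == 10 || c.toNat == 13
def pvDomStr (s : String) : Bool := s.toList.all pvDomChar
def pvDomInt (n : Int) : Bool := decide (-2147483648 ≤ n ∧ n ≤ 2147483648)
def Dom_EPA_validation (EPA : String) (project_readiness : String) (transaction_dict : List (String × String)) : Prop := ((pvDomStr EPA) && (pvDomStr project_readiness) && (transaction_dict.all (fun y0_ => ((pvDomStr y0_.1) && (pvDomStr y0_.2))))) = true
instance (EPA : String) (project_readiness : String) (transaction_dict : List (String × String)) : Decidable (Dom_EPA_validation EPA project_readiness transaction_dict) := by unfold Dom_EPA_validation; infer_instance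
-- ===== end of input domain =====

-- B is a simpler single pass: it keeps the lexicographically least (year, quartal)
-- pair while scanning once, instead of A's three passes (min year, filter, min quartal).

-- shared parse step: s.split("Q")[0] / s.split("Q")[1] (pyGetD: in range under Pre_)
def pvParse (s : String) : String × String :=
  (PySem.List.pyGetD ((PySem.Str.split? s "Q").getD []) 0 "",
   PySem.List.pyGetD ((PySem.Str.split? s "Q").getD []) 1 "")

-- ===== PORT A =====
def EPA_validation (EPA : String) (project_readiness : String) (transaction_dict : List (String × String)) : String :=
  let Q_list := [EPA, project_readiness] ++ PySem.Dict.keys (PySem.Dict.ofList transaction_dict)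
  let Q_split_list := Q_list.map (fun quartal => pvParse quartal)
  let min_year := (PySem.List.min? (Q_split_list.map (fun j => j.2)) (fun y => y)).getD ""
  let Q_split_list2 := Q_split_list.filter (fun i => i.2 == min_year)
  let min_quartal := (PySem.List.min? (Q_split_list2.map (fun j => j.1)) (fun y => y)).getD ""
  min_quartal ++ "Q" ++ min_year

-- ===== PORT B =====
-- loop body: replace best (q, y) if (y, q) < (best_y, best_q) lexicographically
def pvStep (best : String × String) (s : String) : String × String :=
  if (pvParse s).2 < best.2 ∨ ((pvParse s).2 = best.2 ∧ (pvParse s).1 < best.1) then pvParse s else best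

def EPA_validation_alt (EPA : String) (project_readiness : String) (transaction_dict : List (String × String)) : String :=
  let r := (project_readiness :: PySem.Dict.keys (PySem.Dict.ofList transaction_dict)).foldl pvStep (pvParse EPA)
  r.1 ++ "Q" ++ r.2

-- ===== PRECONDITION & SPEC =====
-- Pre_ excludes exactly the inputs where some scanned string has no "Q": there
-- Python A raises IndexError on split("Q")[1].
def Pre_EPA_validation (EPA : String) (project_readiness : String) (transaction_dict : List (String × String)) : Prop :=
  ∀ s ∈ [EPA, project_readiness] ++ PySem.Dict.keys (PySem.Dict.ofList transaction_dict), PySem.Str.isIn "Q" s = true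
instance (EPA : String) (project_readiness : String) (transaction_dict : List (String × String)) : Decidable (Pre_EPA_validation EPA project_readiness transaction_dict) := by unfold Pre_EPA_validation; infer_instance

def pvWitness_EPA_validation : String × String × (List (String × String)) :=
  ("1Q2026", "2Q2025", [("3Q2025", "x"), ("1Q2027", "y")])

def Spec_EPA_validation (EPA : String) (project_readiness : String) (transaction_dict : List (String × String)) (out : String) : Prop := out = EPA_validation_alt EPA project_readiness transaction_dict
instance (EPA : String) (project_readiness : String) (transaction_dict : List (String × String)) (out : String) : Decidable (Spec_EPA_validation EPA project_readiness transaction_dict out) := by unfold Spec_EPA_validation; infer_instance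

-- ===== CLAIM (what is proved, stated in full; the proofs are below) =====
def Claim_equal_EPA_validation : Prop := ∀ (EPA : String) (project_readiness : String) (transaction_dict : List (String × String)), Dom_EPA_validation EPA project_readiness transaction_dict → Pre_EPA_validation EPA project_readiness transaction_dict → Spec_EPA_validation EPA project_readiness transaction_dict (EPA_validation EPA project_readiness transaction_dict)

-- ===== LEMMAS AND PROOFS =====

-- The fold keeps the lexicographically least (year, quartal) = (·.2, ·.1) pair:
-- the result is a member, its year is minimal, and among minimal-year members its
-- quartal is minimal.
theorem pvStep_fold_spec (ps : List String) (p0 : String × String) :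
    (ps.foldl pvStep p0 ∈ p0 :: ps.map pvParse) ∧
    (∀ p ∈ p0 :: ps.map pvParse, (ps.foldl pvStep p0).2 ≤ p.2) ∧
    (∀ p ∈ p0 :: ps.map pvParse, p.2 = (ps.foldl pvStep p0).2 → (ps.foldl pvStep p0).1 ≤ p.1) := by
  induction ps generalizing p0 with
  | nil => simp
  | cons a t ih =>
    simp only [List.foldl_cons, List.map_cons]
    obtain ⟨hmem, hmin, htie⟩ := ih (pvStep p0 a)
    set r := t.foldl pvStep (pvStep p0 a) with hr
    have hm0 : r.2 ≤ (pvStep p0 a).2 := hmin _ (List.mem_cons_self)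
    have ht0 : (pvStep p0 a).2 = r.2 → r.1 ≤ (pvStep p0 a).1 := htie _ (List.mem_cons_self)
    by_cases h : (pvParse a).2 < p0.2 ∨ ((pvParse a).2 = p0.2 ∧ (pvParse a).1 < p0.1)
    · have hs : pvStep p0 a = pvParse a := by unfold pvStep; rw [if_pos h]
      rw [hs] at hmem hmin htie hm0 ht0
      refine ⟨?_, ?_, ?_⟩
      · rcases List.mem_cons.mp hmem with h1 | h1
        · exact List.mem_cons_of_mem _ (h1 ▸ List.mem_cons_self)
        · exact List.mem_cons_of_mem _ (List.mem_cons_of_mem _ h1)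
      · intro p hp
        rcases List.mem_cons.mp hp with h1 | h1
        · subst h1
          rcases h with h2 | h2
          · exact le_of_lt (lt_of_le_of_lt hm0 h2)
          · exact h2.1 ▸ hm0
        · exact hmin _ h1
      · intro p hp hpe
        rcases List.mem_cons.mp hp with h1 | h1
        · subst h1
          rcases h with h2 | h2
          · exact absurd (hpe ▸ lt_of_le_of_lt hm0 h2) (lt_irrefl _)
          · exact le_of_lt (lt_of_le_of_lt (ht0 (h2.1.symm ▸ hpe.symm ▸ rfl)) h2.2)
        · exact htie _ h1 hpe
    · have hs : pvStep p0 a = p0 := by unfold pvStep; rw [if_neg h]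
      rw [hs] at hmem hmin htie hm0 ht0
      push_neg at h
      have hle : p0.2 ≤ (pvParse a).2 := not_lt.mp h.1
      refine ⟨?_, ?_, ?_⟩
      · rcases List.mem_cons.mp hmem with h1 | h1
        · exact h1 ▸ List.mem_cons_self
        · exact List.mem_cons_of_mem _ (List.mem_cons_of_mem _ h1)
      · intro p hp
        rcases List.mem_cons.mp hp with h1 | h1
        · exact h1 ▸ hm0
        · rcases List.mem_cons.mp h1 with h2 | h2
          · exact h2 ▸ le_trans hm0 hle
          · exact hmin _ (List.mem_cons_of_mem _ h2)
      · intro p hp hpe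
        rcases List.mem_cons.mp hp with h1 | h1
        · exact ht0 (h1 ▸ hpe) |>.trans (h1 ▸ le_refl _)
        · rcases List.mem_cons.mp h1 with h2 | h2
          · subst h2
            have hye : (pvParse a).2 = p0.2 := le_antisymm (hpe ▸ hm0) hle
            have hq : p0.1 ≤ (pvParse a).1 := not_lt.mp (h.2 hye)
            exact le_trans (ht0 (hye ▸ hpe)) hq
          · exact htie _ (List.mem_cons_of_mem _ h2) hpe

theorem pv_core (s0 : String) (ss : List String) :
    (let Q_split_list := (s0 :: ss).map (fun quartal => pvParse quartal)
     let min_year := (PySem.List.min? (Q_split_list.map (fun j => j.2)) (fun y => y)).getD ""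
     let Q_split_list2 := Q_split_list.filter (fun i => i.2 == min_year)
     let min_quartal := (PySem.List.min? (Q_split_list2.map (fun j => j.1)) (fun y => y)).getD ""
     min_quartal ++ "Q" ++ min_year)
    = (let r := ss.foldl pvStep (pvParse s0); r.1 ++ "Q" ++ r.2) := by
  simp only [List.map_cons]
  obtain ⟨hmem, hmin, htie⟩ := pvStep_fold_spec ss (pvParse s0)
  set r := ss.foldl pvStep (pvParse s0) with hr
  set pairs := pvParse s0 :: ss.map pvParse with hpairs
  have e2 : ((pvParse s0).2 :: List.map (fun j => j.2) (List.map (fun quartal => pvParse quartal) ss)) = pairs.map (fun j => j.2) := by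
    simp [hpairs]
  rw [e2]
  obtain ⟨my, hmy⟩ : ∃ my, PySem.List.min? (pairs.map (fun j => j.2)) (fun y => y) = some my := by
    cases hc : PySem.List.min? (pairs.map (fun j => j.2)) (fun y => y) with
    | none => exact absurd ((PySem.List.min?_eq_none_iff _ _).mp hc) (by simp [hpairs])
    | some m => exact ⟨m, rfl⟩
  have hmy_mem := PySem.List.min?_mem hmy
  have hmy_min := PySem.List.min?_isMin hmy
  have hmy_eq : my = r.2 := by
    obtain ⟨p, hp, hpe⟩ := List.mem_map.mp hmy_mem
    exact le_antisymm (hmy_min _ (List.mem_map_of_mem hmem)) (hpe ▸ hmin p hp)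
  have hrfil : r ∈ pairs.filter (fun i => i.2 == my) :=
    List.mem_filter.mpr ⟨hmem, by simp [hmy_eq]⟩
  obtain ⟨mq, hmq⟩ : ∃ mq, PySem.List.min? ((pairs.filter (fun i => i.2 == my)).map (fun j => j.1)) (fun y => y) = some mq := by
    cases hc : PySem.List.min? ((pairs.filter (fun i => i.2 == my)).map (fun j => j.1)) (fun y => y) with
    | none =>
      have h0 := (PySem.List.min?_eq_none_iff _ _).mp hc
      rw [List.map_eq_nil_iff] at h0
      exact absurd (h0 ▸ hrfil) (List.not_mem_nil)
    | some m => exact ⟨m, rfl⟩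
  have hmq_mem := PySem.List.min?_mem hmq
  have hmq_min := PySem.List.min?_isMin hmq
  have hmq_eq : mq = r.1 := by
    obtain ⟨p, hp, hpe⟩ := List.mem_map.mp hmq_mem
    obtain ⟨hpmem, hpy⟩ := List.mem_filter.mp hp
    have hpy2 : p.2 = r.2 := by
      have h1 := of_decide_eq_true hpy
      simpa [hmy_eq] using h1
    exact le_antisymm (hmq_min _ (List.mem_map_of_mem hrfil)) (hpe ▸ htie p hpmem hpy2)
  rw [hmy]
  simp only [Option.getD_some]
  rw [hmq]
  simp only [Option.getD_some]
  rw [hmy_eq, hmq_eq]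

-- ===== VERDICT (by name: the statement is the Claim_ definition above) =====
theorem EPA_validation_spec : Claim_equal_EPA_validation := by
  intro EPA pr td _ _
  show EPA_validation EPA pr td = EPA_validation_alt EPA pr td
  exact pv_core EPA (pr :: PySem.Dict.keys (PySem.Dict.ofList td))
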